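-- pv_equiv track=rewrite | github.com/EugeneBudzinskiy/NN_lib | NN_Constructor.py | __init_var_map
-- ===== SOURCE A (Python) =====
-- def __init_var_map(node_count: tuple, layer_count: int):
--     var_map = list()
--     position = 0
--
--     for i in range(layer_count - 1):
--         prev_nc = node_count[i]
--         next_nc = node_count[i + 1]
--
--         weights_size = prev_nc * next_nc
--         biases_size = next_nc
--
--         start = position
--         end_weights = start + weights_size
--         end_biases = end_weights + biases_size
--
--         var_map.append((start, end_weights, end_biases))
--         position = end_biases
--
--     return tuple(var_map)
-- ===== SOURCE B (Python) =====
-- def __init_var_map(node_count: tuple, layer_count: int):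
--     n = layer_count - 1
--     sizes = [node_count[i] * node_count[i + 1] + node_count[i + 1] for i in range(n)]
--     starts = []
--     acc = 0
--     for s in sizes:
--         starts.append(acc)
--         acc += s
--     return tuple(
--         (starts[i], starts[i] + node_count[i] * node_count[i + 1], starts[i] + sizes[i])
--         for i in range(n)
--     )
-- ===== Notes on version B (the rewrite author's own statement) =====
-- stated objective: alternative
-- what changed: A's single loop threading a running position accumulator is replaced by a two-pass table construction: first a per-layer block-size table and a prefix-sum table of start offsets, then a shaped map over the layers emitting (start, start+weights, start+block).
import Mathlib
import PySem

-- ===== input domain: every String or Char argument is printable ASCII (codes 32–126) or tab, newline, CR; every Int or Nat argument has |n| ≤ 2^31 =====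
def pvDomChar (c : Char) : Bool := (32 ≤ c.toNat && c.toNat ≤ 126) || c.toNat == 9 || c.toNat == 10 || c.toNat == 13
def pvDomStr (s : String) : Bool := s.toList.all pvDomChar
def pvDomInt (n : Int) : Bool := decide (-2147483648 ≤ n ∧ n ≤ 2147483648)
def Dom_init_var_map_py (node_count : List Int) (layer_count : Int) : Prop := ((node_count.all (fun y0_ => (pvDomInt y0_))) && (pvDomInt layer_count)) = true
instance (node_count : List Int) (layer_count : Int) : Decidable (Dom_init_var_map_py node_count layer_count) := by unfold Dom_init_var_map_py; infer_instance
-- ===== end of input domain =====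

-- B replaces A's single accumulator-threaded loop by a two-pass table construction
-- (per-layer block sizes, then a prefix-sum table of start offsets, then a shaped map);
-- objective: alternative decomposition, same cost.

-- ===== PORT A =====
-- A: one pass over range(layer_count-1) threading (var_map, position).
def init_var_map_py (node_count : List Int) (layer_count : Int) : List (Int × Int × Int) :=
  ((PySem.List.pyRange 0 (layer_count - 1) 1).foldl
    (fun (st : List (Int × Int × Int) × Int) i =>
      let prev_nc := PySem.List.pyGetD node_count i 0
      let next_nc := PySem.List.pyGetD node_count (i + 1) 0
      let weights_size := prev_nc * next_nc
      let biases_size := next_nc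
      let start := st.2
      let end_weights := start + weights_size
      let end_biases := end_weights + biases_size
      (st.1 ++ [(start, end_weights, end_biases)], end_biases))
    ([], 0)).1

-- ===== PORT B =====
-- B: sizes table, prefix-sum starts table, then a map over the indices.
def init_var_map_py_alt (node_count : List Int) (layer_count : Int) : List (Int × Int × Int) :=
  let idxs := PySem.List.pyRange 0 (layer_count - 1) 1
  let sizes := idxs.map (fun i =>
    PySem.List.pyGetD node_count i 0 * PySem.List.pyGetD node_count (i + 1) 0
      + PySem.List.pyGetD node_count (i + 1) 0)
  let starts := (sizes.foldl (fun (st : List Int × Int) s => (st.1 ++ [st.2], st.2 + s)) ([], 0)).1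
  idxs.map (fun i =>
    (PySem.List.pyGetD starts i 0,
     PySem.List.pyGetD starts i 0
       + PySem.List.pyGetD node_count i 0 * PySem.List.pyGetD node_count (i + 1) 0,
     PySem.List.pyGetD starts i 0 + PySem.List.pyGetD sizes i 0))

-- ===== PRECONDITION & SPEC =====
-- A raises IndexError exactly when layer_count ≥ 2 and layer_count > len(node_count);
-- Pre_ admits precisely the inputs on which A returns.
def Pre_init_var_map_py (node_count : List Int) (layer_count : Int) : Prop :=
  layer_count ≤ 1 ∨ layer_count ≤ (node_count.length : Int)
instance (node_count : List Int) (layer_count : Int) : Decidable (Pre_init_var_map_py node_count layer_count) := by unfold Pre_init_var_map_py; infer_instance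
def pvWitness_init_var_map_py : List Int × Int := ([2, 3, 1], 3)
def Spec_init_var_map_py (node_count : List Int) (layer_count : Int) (out : List (Int × Int × Int)) : Prop := out = init_var_map_py_alt node_count layer_count
instance (node_count : List Int) (layer_count : Int) (out : List (Int × Int × Int)) : Decidable (Spec_init_var_map_py node_count layer_count out) := by unfold Spec_init_var_map_py; infer_instance

-- ===== CLAIM (what is proved, stated in full; the proofs are below) =====
def Claim_equal_init_var_map_py : Prop := ∀ (node_count : List Int) (layer_count : Int), Dom_init_var_map_py node_count layer_count → Pre_init_var_map_py node_count layer_count → Spec_init_var_map_py node_count layer_count (init_var_map_py node_count layer_count)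

-- ===== LEMMAS AND PROOFS =====

-- shorthand (proof-side only)
def pvG (nc : List Int) (i : Int) : Int := PySem.List.pyGetD nc i 0
def pvSz (nc : List Int) (i : Int) : Int := pvG nc i * pvG nc (i + 1) + pvG nc (i + 1)
-- position after k completed iterations
def pvP (nc : List Int) : Nat → Int
  | 0 => 0
  | k + 1 => pvP nc k + pvSz nc (k : Int)
def pvRow (nc : List Int) (i : Int) : Int × Int × Int :=
  (pvP nc i.toNat, pvP nc i.toNat + pvG nc i * pvG nc (i + 1), pvP nc i.toNat + pvSz nc i)

theorem pvA_fold (nc : List Int) (n : Nat) :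
    ((PySem.List.pyRange 0 (n : Int) 1).foldl
      (fun (st : List (Int × Int × Int) × Int) i =>
        let prev_nc := PySem.List.pyGetD nc i 0
        let next_nc := PySem.List.pyGetD nc (i + 1) 0
        let weights_size := prev_nc * next_nc
        let biases_size := next_nc
        let start := st.2
        let end_weights := start + weights_size
        let end_biases := end_weights + biases_size
        (st.1 ++ [(start, end_weights, end_biases)], end_biases))
      ([], 0)) = ((PySem.List.pyRange 0 (n : Int) 1).map (pvRow nc), pvP nc n) := by
  induction n with
  | zero => simp [PySem.List.pyRange_one_eq_nil, pvP]
  | succ n ih =>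
    have hc : ((n + 1 : Nat) : Int) = (n : Int) + 1 := by push_cast; ring
    rw [hc, PySem.List.pyRange_one_succ_right (by positivity), List.foldl_append,
      List.map_append, ih]
    simp only [List.foldl_cons, List.foldl_nil, List.map_cons, List.map_nil]
    refine Prod.ext ?_ ?_
    · simp [pvRow, pvSz, pvG, Int.toNat_natCast]
      ring
    · simp [pvP, pvSz, pvG]
      ring

theorem pvB_starts (nc : List Int) (n : Nat) :
    (((PySem.List.pyRange 0 (n : Int) 1).map (fun i => pvSz nc i)).foldl
      (fun (st : List Int × Int) s => (st.1 ++ [st.2], st.2 + s)) ([], 0))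
      = ((PySem.List.pyRange 0 (n : Int) 1).map (fun i => pvP nc i.toNat), pvP nc n) := by
  induction n with
  | zero => simp [PySem.List.pyRange_one_eq_nil, pvP]
  | succ n ih =>
    have hc : ((n + 1 : Nat) : Int) = (n : Int) + 1 := by push_cast; ring
    rw [hc, PySem.List.pyRange_one_succ_right (by positivity), List.map_append,
      List.foldl_append, ih]
    simp [pvP, Int.toNat_natCast]

theorem pv_eq (nc : List Int) (lc : Int) :
    init_var_map_py nc lc = init_var_map_py_alt nc lc := by
  simp only [init_var_map_py, init_var_map_py_alt]
  by_cases hb : lc - 1 ≤ 0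
  · rw [PySem.List.pyRange_one_eq_nil hb]
    simp
  · have hbn : lc - 1 = (((lc - 1).toNat : Nat) : Int) := by omega
    rw [hbn]
    set n := (lc - 1).toNat with hn
    have hszf : (fun i => PySem.List.pyGetD nc i 0 * PySem.List.pyGetD nc (i + 1) 0
        + PySem.List.pyGetD nc (i + 1) 0) = fun i => pvSz nc i := by
      funext i; simp [pvSz, pvG]
    rw [pvA_fold, hszf, pvB_starts]
    apply List.map_congr_left
    intro i hi
    rw [PySem.List.mem_pyRange_one] at hi
    rw [PySem.List.pyGetD_map_pyRange_of_nonneg _ _ _ _ hi.1 hi.2,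
      PySem.List.pyGetD_map_pyRange_of_nonneg _ _ _ _ hi.1 hi.2]
    simp [pvRow, pvSz, pvG]

-- ===== VERDICT (by name: the statement is the Claim_ definition above) =====
theorem init_var_map_py_spec : Claim_equal_init_var_map_py := by
  intro nc lc _ _
  unfold Spec_init_var_map_py
  exact pv_eq nc lc
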